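-- pv_equiv track=rewrite | github.com/zakordonets/RAG_3 | scripts/benchmark_ort_cpu_vs_dml.py | _make_texts
-- ===== SOURCE A (Python) =====
-- from typing import List, Tuple, Dict
--
-- def _make_texts(n: int) -> List[str]:
--     base = [
--         "Как настроить интеграцию с Telegram?",
--         "Что такое RAG система?",
--         "Как работает векторный поиск?",
--         "Настройка Qdrant базы данных",
--         "Конфигурация LLM провайдеров",
--     ]
--     texts: List[str] = []
--     while len(texts) < n:
--         texts.extend(base)
--     return texts[:n]
-- ===== SOURCE B (Python) =====
-- from typing import List
--
-- def _make_texts(n: int) -> List[str]: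
--     base = [
--         "Как настроить интеграцию с Telegram?",
--         "Что такое RAG система?",
--         "Как работает векторный поиск?",
--         "Настройка Qdrant базы данных",
--         "Конфигурация LLM провайдеров",
--     ]
--     return [base[i % len(base)] for i in range(n)]
-- ===== Notes on version B (the rewrite author's own statement) =====
-- stated objective: idiomatic
-- what changed: B builds the result by direct modular indexing over the output positions (base[i % 5] for i in range(n)) instead of repeatedly extending by whole copies of the base and slicing off the overshoot.
import Mathlib
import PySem

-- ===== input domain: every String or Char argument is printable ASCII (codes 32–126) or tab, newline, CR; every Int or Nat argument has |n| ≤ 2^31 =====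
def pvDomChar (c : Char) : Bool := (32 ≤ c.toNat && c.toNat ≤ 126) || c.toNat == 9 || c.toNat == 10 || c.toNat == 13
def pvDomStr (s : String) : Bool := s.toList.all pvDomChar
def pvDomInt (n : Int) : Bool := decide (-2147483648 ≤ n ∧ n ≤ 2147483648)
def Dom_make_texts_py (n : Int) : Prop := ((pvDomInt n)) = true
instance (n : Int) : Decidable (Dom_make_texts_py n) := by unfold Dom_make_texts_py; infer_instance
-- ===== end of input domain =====

-- B replaces A's extend-whole-copies-then-slice loop by direct modular indexing over the
-- output positions (idiomatic comprehension); same O(n) cost, same return value.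

-- ===== PORT A =====
def pvBase : List String :=
  [ "Как настроить интеграцию с Telegram?"
  , "Что такое RAG система?"
  , "Как работает векторный поиск?"
  , "Настройка Qdrant базы данных"
  , "Конфигурация LLM провайдеров" ]

-- 'while len(texts) < n: texts.extend(base)'
def pvLoopA (n : Int) (texts : List String) : List String :=
  if (texts.length : Int) < n then pvLoopA n (texts ++ pvBase) else texts
termination_by (n - texts.length).toNat
decreasing_by simp [pvBase]; omega

def make_texts_py (n : Int) : List String :=
  PySem.List.slice (pvLoopA n []) none (some n)

-- ===== PORT B =====
-- '[base[i % len(base)] for i in range(n)]' (the index is always in range, so getD's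
-- default is never used)
def make_texts_py_alt (n : Int) : List String :=
  (PySem.List.pyRange 0 n 1).map
    (fun i => (PySem.List.pyGet? pvBase (PySem.Int.mod i (pvBase.length : Int))).getD "")

-- ===== PRECONDITION & SPEC =====
def Spec_make_texts_py (n : Int) (out : List String) : Prop := out = make_texts_py_alt n
instance (n : Int) (out : List String) : Decidable (Spec_make_texts_py n out) := by unfold Spec_make_texts_py; infer_instance

-- ===== CLAIM (what is proved, stated in full; the proofs are below) =====
def Claim_equal_make_texts_py : Prop := ∀ (n : Int), Dom_make_texts_py n → Spec_make_texts_py n (make_texts_py n)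

-- ===== LEMMAS AND PROOFS =====

-- k stacked copies of the base list
def pvRep (k : Nat) : List String := (List.replicate k pvBase).flatten

theorem pvRep_length (k : Nat) : (pvRep k).length = 5 * k := by
  induction k with
  | zero => simp [pvRep]
  | succ k ih =>
    simp [pvRep, List.replicate_succ, List.flatten_cons] at *
    simp [pvBase]; omega

theorem pvRep_succ' (k : Nat) : pvRep (k + 1) = pvRep k ++ pvBase := by
  simp [pvRep, List.replicate_succ']

-- elementwise: the i-th element of stacked copies is base[i % 5]
theorem pvRep_getD (k i : Nat) (h : i < 5 * k) :
    (pvRep k).getD i "" = pvBase.getD (i % 5) "" := by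
  induction k generalizing i with
  | zero => omega
  | succ k ih =>
    rw [pvRep_succ']
    by_cases hi : i < 5 * k
    · rw [List.getD_append _ _ _ _ (by rw [pvRep_length]; omega)]
      exact ih i hi
    · have hlen : (pvRep k).length = 5 * k := pvRep_length k
      have : i = 5 * k + (i - 5 * k) := by omega
      rw [List.getD_eq_getElem?_getD, List.getElem?_append_right (by omega),
        hlen]
      have hmod : i % 5 = i - 5 * k := by omega
      rw [hmod, ← List.getD_eq_getElem?_getD]

-- the loop, started on k stacked copies, returns K stacked copies with 5*K ≥ n
theorem pvLoopA_rep (n : Int) (k : Nat) :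
    ∃ K : Nat, k ≤ K ∧ pvLoopA n (pvRep k) = pvRep K ∧ n ≤ (5 * K : Int) := by
  by_cases h : ((pvRep k).length : Int) < n
  · have hlen : (pvRep k).length = 5 * k := pvRep_length k
    have ⟨K, hK1, hK2, hK3⟩ := pvLoopA_rep n (k + 1)
    refine ⟨K, by omega, ?_, hK3⟩
    rw [pvLoopA, if_pos h, ← pvRep_succ', hK2]
  · refine ⟨k, le_refl _, ?_, ?_⟩
    · rw [pvLoopA, if_neg h]
    · rw [pvRep_length k] at h; push_cast at h ⊢; omega
termination_by ((n - 5 * k).toNat)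
decreasing_by rw [pvRep_length] at h; push_cast at h; omega

-- taking m ≤ 5K elements of the stack is the modular-index list
theorem pvTake_rep (K m : Nat) (hm : m ≤ 5 * K) :
    (pvRep K).take m = (List.range m).map (fun i => pvBase.getD (i % 5) "") := by
  apply List.ext_getElem
  · simp [pvRep_length]; omega
  · intro i h1 h2
    simp only [List.getElem_take, List.getElem_map, List.getElem_range]
    have hi : i < m := by simpa [pvRep_length] using h2
    have := pvRep_getD K i (by omega)
    have h5 : i % 5 < 5 := Nat.mod_lt _ (by omega)
    simpa [List.getD_eq_getElem?_getD, List.getElem?_eq_getElem,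
      (by rw [pvRep_length]; omega : i < (pvRep K).length),
      (by simp [pvBase]; omega : i % 5 < pvBase.length)] using this

theorem make_texts_py_eq (n : Int) :
    make_texts_py n = (List.range n.toNat).map (fun i => pvBase.getD (i % 5) "") := by
  by_cases hn : 0 ≤ n
  · obtain ⟨K, -, hK2, hK3⟩ := pvLoopA_rep n 0
    have h0 : pvRep 0 = [] := by simp [pvRep]
    rw [make_texts_py, ← h0, hK2, PySem.List.slice_to _ hn,
      pvTake_rep K n.toNat (by omega)]
  · have h1 : n.toNat = 0 := by omega
    rw [make_texts_py, pvLoopA, if_neg (by simp; omega), h1]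
    simp [PySem.List.slice]

theorem make_texts_py_alt_eq (n : Int) :
    make_texts_py_alt n = (List.range n.toNat).map (fun i => pvBase.getD (i % 5) "") := by
  rw [make_texts_py_alt, PySem.List.pyRange_one]
  simp only [Int.sub_zero, Int.zero_add, List.map_map]
  apply List.map_congr_left
  intro k hk
  simp only [Function.comp]
  have h5 : (pvBase.length : Int) = 5 := by simp [pvBase]
  rw [h5]
  have hmod : PySem.Int.mod (k : Int) 5 = ((k % 5 : Nat) : Int) := by
    exact_mod_cast PySem.Int.mod_natCast k 5
  rw [hmod, PySem.List.pyGet?_natCast]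
  have : k % 5 < pvBase.length := by simp [pvBase]; omega
  simp [List.getD_eq_getElem?_getD, List.getElem?_eq_getElem this]

-- ===== VERDICT (by name: the statement is the Claim_ definition above) =====
theorem make_texts_py_spec : Claim_equal_make_texts_py := by
  intro n _
  unfold Spec_make_texts_py
  rw [make_texts_py_eq, make_texts_py_alt_eq]
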